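-- pv_equiv track=rewrite | github.com/ShitMountainMaker/poincare | scripts/build_semantic_id_stage_comparison.py | ordered_fieldnames
-- ===== SOURCE A (Python) =====
-- from typing import Any, Dict, Iterable, List, Optional
--
-- def ordered_fieldnames(rows: List[Dict[str, Any]]) -> List[str]:
--     preferred_prefixes = [
--         "method",
--         "training_output_dir",
--         "inference_output_dir",
--         "metrics_file",
--         "checkpoint_path",
--         "selected_weight",
--         "selection_mode",
--         "semantic_id_source",
--         "proxy_result_path",
--         "final_step",
--         "final_epoch",
--         "final_training_loss",
--         "final_quantization_loss",
--         "final_reconstruction_loss",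
--         "final_hierarchy_loss",
--         "avg_utilization",
--         "overall_utilization",
--         "collision_rate",
--         "frac_unique_ids",
--         "avg_sibling_separation",
--         "near_collision_separation",
--         "same_parent_leaf_uniqueness",
--         "same_parent_collision_rate",
--         "same_parent_assignment_margin",
--         "same_parent_positive_margin_fraction",
--         "full_collision_distance_mean",
--         "sibling_distance_mean",
--         "mid_prefix_distance_mean",
--         "unrelated_distance_mean",
--         "distance_gap_full_minus_sibling",
--         "distance_gap_unrelated_minus_sibling",
--         "num_items",
--         "num_unique_ids",
--         "num_colliding_items",
--         "prefix_metric_type",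
--     ]
--
--     all_keys = {key for row in rows for key in row.keys()}
--     per_layer_keys = []
--     for prefix in (
--         "utilization_layer_",
--         "entropy_layer_",
--         "max_token_ratio_layer_",
--         "topk_token_coverage_layer_",
--         "prefix_metric_layer_",
--         "sibling_separation_layer_",
--     ):
--         per_layer_keys.extend(sorted(key for key in all_keys if key.startswith(prefix)))
--
--     ordered = preferred_prefixes + per_layer_keys
--     ordered.extend(
--         sorted(key for key in all_keys if key not in set(ordered) and key != "notes")
--     )
--     if "notes" in all_keys:
--         ordered.append("notes")
--     return [key for key in ordered if key in all_keys]
-- ===== SOURCE B (Python) =====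
-- from typing import Any, Dict, List
--
--
-- def ordered_fieldnames(rows: List[Dict[str, Any]]) -> List[str]:
--     preferred_prefixes = [
--         "method",
--         "training_output_dir",
--         "inference_output_dir",
--         "metrics_file",
--         "checkpoint_path",
--         "selected_weight",
--         "selection_mode",
--         "semantic_id_source",
--         "proxy_result_path",
--         "final_step",
--         "final_epoch",
--         "final_training_loss",
--         "final_quantization_loss",
--         "final_reconstruction_loss",
--         "final_hierarchy_loss",
--         "avg_utilization",
--         "overall_utilization",
--         "collision_rate",
--         "frac_unique_ids",
--         "avg_sibling_separation",
--         "near_collision_separation",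
--         "same_parent_leaf_uniqueness",
--         "same_parent_collision_rate",
--         "same_parent_assignment_margin",
--         "same_parent_positive_margin_fraction",
--         "full_collision_distance_mean",
--         "sibling_distance_mean",
--         "mid_prefix_distance_mean",
--         "unrelated_distance_mean",
--         "distance_gap_full_minus_sibling",
--         "distance_gap_unrelated_minus_sibling",
--         "num_items",
--         "num_unique_ids",
--         "num_colliding_items",
--         "prefix_metric_type",
--     ]
--     layer_prefixes = [
--         "utilization_layer_",
--         "entropy_layer_",
--         "max_token_ratio_layer_",
--         "topk_token_coverage_layer_",
--         "prefix_metric_layer_",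
--         "sibling_separation_layer_",
--     ]
--     pref_rank = {name: i for i, name in enumerate(preferred_prefixes)}
--     n = len(preferred_prefixes)
--     m = len(layer_prefixes)
--
--     def rank(key):
--         if key in pref_rank:
--             return (pref_rank[key], "")
--         for i, p in enumerate(layer_prefixes):
--             if key.startswith(p):
--                 return (n + i, key)
--         if key == "notes":
--             return (n + m + 1, "")
--         return (n + m, key)
--
--     present = {key for row in rows for key in row}
--     return sorted(present, key=rank)
-- ===== Notes on version B (the rewrite author's own statement) =====
-- stated objective: alternative
-- what changed: Replaces A's multi-pass construction (preferred concatenation, six per-prefix rescans of the key set, an 'others' sort, a notes append, and a final presence filter) by a single keyed sort of the present keys under one rank tuple (preferred index, per-layer-prefix bucket, alphabetical, notes last).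
import Mathlib
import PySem

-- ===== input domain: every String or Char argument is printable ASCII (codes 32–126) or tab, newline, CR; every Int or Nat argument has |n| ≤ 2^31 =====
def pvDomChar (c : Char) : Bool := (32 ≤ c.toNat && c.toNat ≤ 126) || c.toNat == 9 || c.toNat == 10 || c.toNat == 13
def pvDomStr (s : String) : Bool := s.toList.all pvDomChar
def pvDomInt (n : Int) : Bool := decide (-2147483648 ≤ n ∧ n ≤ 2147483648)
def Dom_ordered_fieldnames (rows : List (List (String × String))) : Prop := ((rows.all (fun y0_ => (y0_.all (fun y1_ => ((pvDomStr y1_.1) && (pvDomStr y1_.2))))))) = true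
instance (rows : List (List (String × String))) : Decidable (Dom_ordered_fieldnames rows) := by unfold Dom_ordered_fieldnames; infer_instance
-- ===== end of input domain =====

-- B replaces A's multi-pass construction (preferred concatenation, six per-prefix rescans,
-- an 'others' sort, a notes append, a final presence filter) by ONE keyed sort of the
-- present keys under a rank tuple; same result, a genuinely different decomposition.

-- constants shared by both ports (both Python versions carry the same literal lists)
def pvPreferred : List String := [
  "method", "training_output_dir", "inference_output_dir", "metrics_file",
  "checkpoint_path", "selected_weight", "selection_mode", "semantic_id_source",
  "proxy_result_path", "final_step", "final_epoch", "final_training_loss",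
  "final_quantization_loss", "final_reconstruction_loss", "final_hierarchy_loss",
  "avg_utilization", "overall_utilization", "collision_rate", "frac_unique_ids",
  "avg_sibling_separation", "near_collision_separation", "same_parent_leaf_uniqueness",
  "same_parent_collision_rate", "same_parent_assignment_margin",
  "same_parent_positive_margin_fraction", "full_collision_distance_mean",
  "sibling_distance_mean", "mid_prefix_distance_mean", "unrelated_distance_mean",
  "distance_gap_full_minus_sibling", "distance_gap_unrelated_minus_sibling",
  "num_items", "num_unique_ids", "num_colliding_items", "prefix_metric_type"]

def pvLayerPrefixes : List String := [
  "utilization_layer_", "entropy_layer_", "max_token_ratio_layer_",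
  "topk_token_coverage_layer_", "prefix_metric_layer_", "sibling_separation_layer_"]

-- ===== PORT A =====
def ordered_fieldnames (rows : List (List (String × String))) : List String :=
  let all_keys : PySem.Set String := PySem.Set.ofList (rows.flatMap (fun row => row.map Prod.fst))
  let per_layer_keys : List String :=
    pvLayerPrefixes.foldl
      (fun acc pfx =>
        acc ++ PySem.List.sorted (all_keys.filter (fun k => PySem.Str.startswith k pfx)) (fun k => k)) []
  let ordered1 : List String := pvPreferred ++ per_layer_keys
  let ordered2 : List String := ordered1 ++
    PySem.List.sorted
      (all_keys.filter (fun k => !(PySem.Set.contains (PySem.Set.ofList ordered1) k) && k != "notes"))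
      (fun k => k)
  let ordered3 : List String :=
    if PySem.Set.contains all_keys "notes" then ordered2 ++ ["notes"] else ordered2
  ordered3.filter (fun k => PySem.Set.contains all_keys k)

-- ===== PORT B =====
-- pref_rank = {name: i for i, name in enumerate(preferred_prefixes)}
def pvPrefRank : PySem.Dict String Int :=
  (PySem.List.enumerate pvPreferred).foldl (fun d p => d.insert p.2 p.1) PySem.Dict.empty

-- rank(key): the sort key of Source B, a (int, str) tuple
def pvRank (k : String) : Int × String :=
  match pvPrefRank.get? k with
  | some i => (i, "")
  | none =>
    match List.findIdx? (fun p => PySem.Str.startswith k p) pvLayerPrefixes with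
    | some i => (PySem.List.len pvPreferred + (i : Int), k)
    | none =>
      if k == "notes" then (PySem.List.len pvPreferred + PySem.List.len pvLayerPrefixes + 1, "")
      else (PySem.List.len pvPreferred + PySem.List.len pvLayerPrefixes, k)

def ordered_fieldnames_alt (rows : List (List (String × String))) : List String :=
  let present : PySem.Set String := PySem.Set.ofList (rows.flatMap (fun row => row.map Prod.fst))
  PySem.List.sorted2 present (fun k => (pvRank k).1) (fun k => (pvRank k).2)

-- ===== PRECONDITION & SPEC =====
def Spec_ordered_fieldnames (rows : List (List (String × String))) (out : List String) : Prop := out = ordered_fieldnames_alt rows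
instance (rows : List (List (String × String))) (out : List String) : Decidable (Spec_ordered_fieldnames rows out) := by unfold Spec_ordered_fieldnames; infer_instance

-- ===== CLAIM (what is proved, stated in full; the proofs are below) =====
def Claim_equal_ordered_fieldnames : Prop := ∀ (rows : List (List (String × String))), Dom_ordered_fieldnames rows → Spec_ordered_fieldnames rows (ordered_fieldnames rows)

-- ===== LEMMAS AND PROOFS =====

-- the tuple key of Source B, packed into a lexicographically ordered pair for the order lemmas
def pvKey (k : String) : Lex (Int × String) := toLex (pvRank k)

-- sorted2 with Source B's two key components IS sorted under the packed lexicographic key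
lemma pv_sorted2_eq (xs : List String) :
    PySem.List.sorted2 xs (fun k => (pvRank k).1) (fun k => (pvRank k).2) =
      PySem.List.sorted xs pvKey := by
  rw [PySem.List.sorted_eq_foldl_insertBy]
  unfold PySem.List.sorted2
  have hfun : (fun a b : String => (decide ((pvRank a).1 < (pvRank b).1) ||
        (!decide ((pvRank b).1 < (pvRank a).1) && decide ((pvRank a).2 < (pvRank b).2)))) =
      fun a b : String => decide (pvKey a < pvKey b) := by
    funext a b
    have hiff : (pvKey a < pvKey b) ↔ ((pvRank a).1 < (pvRank b).1 ∨
        (pvRank a).1 = (pvRank b).1 ∧ (pvRank a).2 < (pvRank b).2) := Prod.Lex.toLex_lt_toLex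
    rcases lt_trichotomy ((pvRank a).1) ((pvRank b).1) with h | h | h
    · simp [hiff, h, not_lt_of_gt h]
    · simp [hiff, h]
    · simp [hiff, h, not_lt_of_gt h, h.ne']
  simp only [Bool.false_eq_true, if_false, hfun]

-- no two distinct layer prefixes are prefixes of the same key
set_option maxRecDepth 16384 in
lemma pv_excl : ∀ p ∈ pvLayerPrefixes, ∀ q ∈ pvLayerPrefixes, ∀ k : String,
    PySem.Str.startswith k p = true → PySem.Str.startswith k q = true → p = q := by
  have hnp : ∀ p ∈ pvLayerPrefixes, ∀ q ∈ pvLayerPrefixes, p ≠ q → ¬ (p.toList <+: q.toList) := by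
    decide
  intro p hp q hq k h1 h2
  by_contra hne
  simp only [PySem.Str.startswith_eq] at h1 h2
  rw [PySem.Chars.startswith_iff] at h1 h2
  rcases List.prefix_or_prefix_of_prefix h1 h2 with h | h
  · exact hnp p hp q hq hne h
  · exact hnp q hq p hp (Ne.symm hne) h

lemma pv_findIdx?_eq_idxOf {α : Type} [DecidableEq α] (l : List α) (p : α → Bool) (x : α)
    (hx : x ∈ l) (hpx : p x = true) (huniq : ∀ y ∈ l, p y = true → y = x) :
    l.findIdx? p = some (l.idxOf x) := by
  induction l with
  | nil => cases hx
  | cons a t ih =>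
    by_cases hpa : p a = true
    · have hax : a = x := huniq a List.mem_cons_self hpa
      simp [List.findIdx?_cons, hax, hpx]
    · have hax : a ≠ x := fun he => hpa (he ▸ hpx)
      have hxt : x ∈ t := by
        rcases List.mem_cons.mp hx with h | h
        · exact absurd h.symm hax
        · exact h
      have := ih hxt (fun y hy hpy => huniq y (List.mem_cons_of_mem a hy) hpy)
      simp [List.findIdx?_cons, hpa, hax, this]

set_option maxRecDepth 16384 in
lemma pv_get?_none (k : String) (h : k ∉ pvPreferred) : pvPrefRank.get? k = none := by
  rw [PySem.Dict.get?_eq_none_iff_not_mem_keys]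
  have hk : pvPrefRank.keys = pvPreferred := by decide
  rw [hk]; exact h

set_option maxRecDepth 16384 in
lemma pv_pref_fst_ranks : pvPreferred.map (fun a => (pvRank a).1) =
    [0,1,2,3,4,5,6,7,8,9,10,11,12,13,14,15,16,17,18,19,20,21,22,23,24,25,26,27,28,29,30,31,32,33,34] := by
  decide

lemma pv_pref_pairwise : pvPreferred.Pairwise (fun a b => pvKey a < pvKey b) := by
  have h2 : (pvPreferred.map (fun a => (pvRank a).1)).Pairwise (· < ·) := by
    rw [pv_pref_fst_ranks]; decide
  exact (List.pairwise_map.mp h2).imp (fun h => Prod.Lex.toLex_lt_toLex.mpr (Or.inl h))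

lemma pv_pref_fst_lt (a : String) (ha : a ∈ pvPreferred) : (pvRank a).1 < 35 := by
  have hm : (pvRank a).1 ∈ pvPreferred.map (fun a => (pvRank a).1) :=
    List.mem_map_of_mem ha
  rw [pv_pref_fst_ranks] at hm
  have : ∀ x ∈ ([0,1,2,3,4,5,6,7,8,9,10,11,12,13,14,15,16,17,18,19,20,21,22,23,24,25,26,27,28,29,30,31,32,33,34] : List Int), x < 35 := by decide
  exact this _ hm

set_option maxRecDepth 16384 in
lemma pv_pref_not_layer : ∀ a ∈ pvPreferred, ∀ q ∈ pvLayerPrefixes,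
    PySem.Str.startswith a q = false := by
  decide

lemma pv_rank_layer (p : String) (hp : p ∈ pvLayerPrefixes) (k : String)
    (hs : PySem.Str.startswith k p = true) (hk : k ∉ pvPreferred) :
    pvRank k = (35 + (pvLayerPrefixes.idxOf p : Int), k) := by
  have hfind : List.findIdx? (fun q => PySem.Str.startswith k q) pvLayerPrefixes =
      some (pvLayerPrefixes.idxOf p) :=
    pv_findIdx?_eq_idxOf _ _ p hp hs (fun q hq hpq => pv_excl q hq p hp k hpq hs)
  unfold pvRank
  rw [pv_get?_none k hk, hfind]
  simp [PySem.List.len_eq, pvPreferred]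

lemma pv_rank_other (k : String) (hk : k ∉ pvPreferred)
    (hno : ∀ q ∈ pvLayerPrefixes, PySem.Str.startswith k q = false) (hne : k ≠ "notes") :
    pvRank k = (41, k) := by
  have hfind : List.findIdx? (fun q => PySem.Str.startswith k q) pvLayerPrefixes = none :=
    List.findIdx?_eq_none_iff.mpr hno
  unfold pvRank
  rw [pv_get?_none k hk, hfind]
  simp [hne, PySem.List.len_eq, pvPreferred, pvLayerPrefixes]

set_option maxRecDepth 16384 in
lemma pv_rank_notes : pvRank "notes" = (42, "") := by
  decide

-- proof-side names for the stages of A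
def pvBucket (S : List String) (p : String) : List String :=
  PySem.List.sorted (S.filter (fun k => PySem.Str.startswith k p)) (fun k => k)
def pvPerLayer (S : List String) : List String := pvLayerPrefixes.flatMap (fun p => pvBucket S p)
def pvOrdered1 (S : List String) : List String := pvPreferred ++ pvPerLayer S
def pvOthers (S : List String) : List String :=
  PySem.List.sorted
    (S.filter (fun k => !(PySem.Set.contains (PySem.Set.ofList (pvOrdered1 S)) k) && k != "notes"))
    (fun k => k)
def pvNotes (S : List String) : List String :=
  if PySem.Set.contains S "notes" then ["notes"] else []
def pvR (S : List String) : List String :=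
  (((pvOrdered1 S) ++ pvOthers S) ++ pvNotes S).filter (fun k => PySem.Set.contains S k)

lemma pv_A_eq (rows : List (List (String × String))) :
    ordered_fieldnames rows =
      pvR (PySem.Set.ofList (rows.flatMap (fun row => row.map Prod.fst))) := by
  simp only [ordered_fieldnames, pvR, pvNotes, pvOthers, pvOrdered1, pvPerLayer, pvBucket,
    PySem.List.foldl_append_eq_flatMap, List.nil_append]
  split
  · rfl
  · rw [List.append_nil]

lemma pv_mem_bucket (S : List String) (p : String) (x : String) :
    x ∈ pvBucket S p ↔ x ∈ S ∧ PySem.Str.startswith x p = true := by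
  simp [pvBucket, PySem.List.mem_sorted, List.mem_filter]

lemma pv_not_pref_of_layer (x p : String) (hp : p ∈ pvLayerPrefixes)
    (hs : PySem.Str.startswith x p = true) : x ∉ pvPreferred := by
  intro hx
  rw [pv_pref_not_layer x hx p hp] at hs
  cases hs

lemma pv_sorted_filter_pairwise (S : List String) (hnd : S.Nodup) (q : String → Bool) :
    (PySem.List.sorted (S.filter q) (fun k => k)).Pairwise (fun a b : String => a < b) := by
  have hle : (PySem.List.sorted (S.filter q) (fun k => k)).Pairwise (fun a b : String => a ≤ b) :=
    PySem.List.sorted_pairwise _ _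
  have hnodup : (PySem.List.sorted (S.filter q) (fun k => k)).Nodup :=
    ((PySem.List.sorted_perm (S.filter q) (fun k : String => k) false).nodup_iff).mpr (hnd.filter q)
  exact (hle.and hnodup).imp (fun h => lt_of_le_of_ne h.1 h.2)

lemma pv_bucket_pairwise (S : List String) (hnd : S.Nodup) (p : String) (hp : p ∈ pvLayerPrefixes) :
    (pvBucket S p).Pairwise (fun a b => pvKey a < pvKey b) := by
  have hlt : (pvBucket S p).Pairwise (fun a b : String => a < b) :=
    pv_sorted_filter_pairwise S hnd _
  refine hlt.imp_of_mem ?_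
  intro a b ha hb hab
  have hsa := ((pv_mem_bucket S p a).mp ha).2
  have hsb := ((pv_mem_bucket S p b).mp hb).2
  rw [pvKey, pvKey, pv_rank_layer p hp a hsa (pv_not_pref_of_layer a p hp hsa),
      pv_rank_layer p hp b hsb (pv_not_pref_of_layer b p hp hsb)]
  exact Prod.Lex.toLex_lt_toLex.mpr (Or.inr ⟨rfl, hab⟩)

lemma pv_perLayer_pairwise (S : List String) (hnd : S.Nodup) :
    (pvPerLayer S).Pairwise (fun a b => pvKey a < pvKey b) := by
  rw [pvPerLayer, List.flatMap_def]
  rw [List.pairwise_flatten]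
  constructor
  · intro l hl
    rcases List.mem_map.mp hl with ⟨p, hp, rfl⟩
    exact pv_bucket_pairwise S hnd p hp
  · rw [List.pairwise_map]
    have hidx : pvLayerPrefixes.Pairwise
        (fun p q => pvLayerPrefixes.idxOf p < pvLayerPrefixes.idxOf q) := by decide
    refine hidx.imp_of_mem ?_
    intro p q hp hq hpq x hx y hy
    have hsx := ((pv_mem_bucket S p x).mp hx).2
    have hsy := ((pv_mem_bucket S q y).mp hy).2
    rw [pvKey, pvKey, pv_rank_layer p hp x hsx (pv_not_pref_of_layer x p hp hsx),
        pv_rank_layer q hq y hsy (pv_not_pref_of_layer y q hq hsy)]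
    refine Prod.Lex.toLex_lt_toLex.mpr (Or.inl ?_)
    have : (pvLayerPrefixes.idxOf p : Int) < (pvLayerPrefixes.idxOf q : Int) := by exact_mod_cast hpq
    omega

lemma pv_mem_others (S : List String) (x : String) :
    x ∈ pvOthers S ↔ x ∈ S ∧ x ∉ pvOrdered1 S ∧ x ≠ "notes" := by
  have hc : ∀ b : Bool, ((!b && (x != "notes")) = true) ↔ (b = false ∧ x ≠ "notes") := by
    intro b; cases b <;> simp
  rw [pvOthers, PySem.List.mem_sorted, List.mem_filter, hc]
  have hco : (PySem.Set.contains (PySem.Set.ofList (pvOrdered1 S)) x = false) ↔ x ∉ pvOrdered1 S := by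
    rw [← Bool.not_eq_true, PySem.Set.contains_iff, PySem.Set.mem_ofList]
  rw [hco]

lemma pv_no_layer_of_not_ordered1 (S : List String) (x : String) (hxS : x ∈ S)
    (hno : x ∉ pvOrdered1 S) : ∀ q ∈ pvLayerPrefixes, PySem.Str.startswith x q = false := by
  intro q hq
  by_contra h
  have h' : PySem.Str.startswith x q = true := by
    cases hh : PySem.Str.startswith x q
    · exact absurd hh h
    · rfl
  exact hno (List.mem_append_right _
    (List.mem_flatMap.mpr ⟨q, hq, (pv_mem_bucket S q x).mpr ⟨hxS, h'⟩⟩))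

lemma pv_rank_of_mem_others (S : List String) (x : String) (hx : x ∈ pvOthers S) :
    pvRank x = (41, x) := by
  rcases (pv_mem_others S x).mp hx with ⟨hxS, hno, hne⟩
  have hnp : x ∉ pvPreferred := fun h => hno (List.mem_append_left _ h)
  exact pv_rank_other x hnp (pv_no_layer_of_not_ordered1 S x hxS hno) hne

lemma pv_others_pairwise (S : List String) (hnd : S.Nodup) :
    (pvOthers S).Pairwise (fun a b => pvKey a < pvKey b) := by
  have hlt : (pvOthers S).Pairwise (fun a b : String => a < b) :=
    pv_sorted_filter_pairwise S hnd _
  refine hlt.imp_of_mem ?_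
  intro a b ha hb hab
  rw [pvKey, pvKey, pv_rank_of_mem_others S a ha, pv_rank_of_mem_others S b hb]
  exact Prod.Lex.toLex_lt_toLex.mpr (Or.inr ⟨rfl, hab⟩)

-- first components of the key, groupwise
lemma pv_fst_layer_mem (S : List String) (x : String) (hx : x ∈ pvPerLayer S) :
    35 ≤ (pvRank x).1 ∧ (pvRank x).1 ≤ 40 := by
  rcases List.mem_flatMap.mp hx with ⟨p, hp, hxb⟩
  have hsx := ((pv_mem_bucket S p x).mp hxb).2
  rw [pv_rank_layer p hp x hsx (pv_not_pref_of_layer x p hp hsx)]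
  have hidx : pvLayerPrefixes.idxOf p < pvLayerPrefixes.length := List.idxOf_lt_length_of_mem hp
  have : pvLayerPrefixes.length = 6 := by decide
  have h2 : (pvLayerPrefixes.idxOf p : Int) < 6 := by omega
  refine ⟨by simp, by simp; omega⟩

lemma pv_key_lt_of_fst (a b : String) (h : (pvRank a).1 < (pvRank b).1) : pvKey a < pvKey b :=
  Prod.Lex.toLex_lt_toLex.mpr (Or.inl h)

lemma pv_R_pairwise (S : List String) (hnd : S.Nodup) :
    (pvR S).Pairwise (fun a b => pvKey a < pvKey b) := by
  have hfilter : (pvR S).Sublist (((pvOrdered1 S) ++ pvOthers S) ++ pvNotes S) :=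
    List.filter_sublist
  refine List.Pairwise.sublist hfilter ?_
  rw [List.pairwise_append, List.pairwise_append, pvOrdered1, List.pairwise_append]
  refine ⟨⟨⟨pv_pref_pairwise, pv_perLayer_pairwise S hnd, ?_⟩, pv_others_pairwise S hnd, ?_⟩, ?_, ?_⟩
  · -- preferred < per-layer
    intro a ha y hy
    refine pv_key_lt_of_fst a y ?_
    have h1 := pv_pref_fst_lt a ha
    have h2 := (pv_fst_layer_mem S y hy).1
    omega
  · -- ordered1 < others
    intro a ha y hy
    refine pv_key_lt_of_fst a y ?_
    have hy41 : (pvRank y).1 = 41 := by rw [pv_rank_of_mem_others S y hy]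
    rcases List.mem_append.mp ha with h | h
    · have := pv_pref_fst_lt a h; omega
    · have := (pv_fst_layer_mem S a h).2; omega
  · -- notes pairwise (singleton or empty)
    unfold pvNotes
    split
    · simp
    · simp
  · -- everything < notes
    intro a ha y hy
    have hy' : y = "notes" := by
      unfold pvNotes at hy
      rcases (by split at hy <;> simp_all : y = "notes") with h
      exact h
    subst hy'
    refine pv_key_lt_of_fst a _ ?_
    have h42 : (pvRank "notes").1 = 42 := by rw [pv_rank_notes]
    rcases List.mem_append.mp ha with h | h
    · rcases List.mem_append.mp h with h1 | h1
      · have := pv_pref_fst_lt a h1; omega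
      · have := (pv_fst_layer_mem S a h1).2; omega
    · have := pv_rank_of_mem_others S a h; rw [this]; omega

lemma pv_R_mem (S : List String) (x : String) : x ∈ pvR S ↔ x ∈ S := by
  constructor
  · intro hx
    have := (List.mem_filter.mp hx).2
    exact (PySem.Set.contains_iff S x).mp this
  · intro hx
    refine List.mem_filter.mpr ⟨?_, (PySem.Set.contains_iff S x).mpr hx⟩
    by_cases hP : x ∈ pvPreferred
    · exact List.mem_append_left _ (List.mem_append_left _ (List.mem_append_left _ hP))
    by_cases hL : ∃ q ∈ pvLayerPrefixes, PySem.Str.startswith x q = true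
    · rcases hL with ⟨q, hq, hs⟩
      exact List.mem_append_left _ (List.mem_append_left _ (List.mem_append_right _
        (List.mem_flatMap.mpr ⟨q, hq, (pv_mem_bucket S q x).mpr ⟨hx, hs⟩⟩)))
    by_cases hnotes : x = "notes"
    · subst hnotes
      refine List.mem_append_right _ ?_
      unfold pvNotes
      rw [if_pos ((PySem.Set.contains_iff S "notes").mpr hx)]
      exact List.mem_singleton_self _
    · refine List.mem_append_left _ (List.mem_append_right _ ?_)
      refine (pv_mem_others S x).mpr ⟨hx, ?_, hnotes⟩
      intro ho
      rcases List.mem_append.mp ho with h | h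
      · exact hP h
      · rcases List.mem_flatMap.mp h with ⟨q, hq, hb⟩
        exact hL ⟨q, hq, ((pv_mem_bucket S q x).mp hb).2⟩

lemma pv_R_eq_sorted (S : List String) (hnd : S.Nodup) :
    PySem.List.sorted S pvKey = pvR S := by
  have hpw := pv_R_pairwise S hnd
  have hRnd : (pvR S).Nodup :=
    hpw.imp (fun h => fun hab => absurd (congrArg pvKey hab) (ne_of_lt h))
  exact PySem.List.sorted_eq_of_perm_of_pairwise_lt S (pvR S) pvKey
    ((List.perm_ext_iff_of_nodup hRnd hnd).mpr (pv_R_mem S)) hpw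

-- the heart: A's output is the strictly pvKey-increasing arrangement of the present keys
lemma pv_main (rows : List (List (String × String))) :
    ordered_fieldnames rows =
      PySem.List.sorted (PySem.Set.ofList (rows.flatMap (fun row => row.map Prod.fst))) pvKey := by
  rw [pv_A_eq, pv_R_eq_sorted _ (PySem.Set.nodup_ofList _)]

-- ===== VERDICT (by name: the statement is the Claim_ definition above) =====
theorem ordered_fieldnames_spec : Claim_equal_ordered_fieldnames := by
  intro rows _
  unfold Spec_ordered_fieldnames ordered_fieldnames_alt
  rw [pv_main, pv_sorted2_eq]
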